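-- pv_equiv track=rewrite | github.com/m20-sch57/lowest-unique-number | tournament.py | get_winner
-- ===== SOURCE A (Python) =====
-- def get_winner(turns):
--     cnt = dict()
--     for turn in turns:
--         if turn not in cnt:
--             cnt[turn] = 1
--         else:
--             cnt[turn] += 1
--     unique = [turn for turn in cnt.keys() if cnt[turn] == 1]
--     if len(unique) == 0:
--         return -1
--     return turns.index(min(unique))
-- ===== SOURCE B (Python) =====
-- def get_winner(turns):
--     # Sort a copy; scan runs of equal values in ascending order and return the
--     # original index of the first value whose run has length 1; -1 if none.
--     s = sorted(turns)
--     i, n = 0, len(s)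
--     while i < n:
--         x = s[i]
--         if i + 1 == n or s[i + 1] != x:
--             return turns.index(x)
--         while i < n and s[i] == x:
--             i += 1
--     return -1
-- ===== Notes on version B (the rewrite author's own statement) =====
-- stated objective: alternative
-- what changed: Replaces the dict-counting pass plus min() over unique keys by sorting a copy and scanning runs of equal values for the first run of length 1 (smallest unique value), then looking up its first index.
import Mathlib
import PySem

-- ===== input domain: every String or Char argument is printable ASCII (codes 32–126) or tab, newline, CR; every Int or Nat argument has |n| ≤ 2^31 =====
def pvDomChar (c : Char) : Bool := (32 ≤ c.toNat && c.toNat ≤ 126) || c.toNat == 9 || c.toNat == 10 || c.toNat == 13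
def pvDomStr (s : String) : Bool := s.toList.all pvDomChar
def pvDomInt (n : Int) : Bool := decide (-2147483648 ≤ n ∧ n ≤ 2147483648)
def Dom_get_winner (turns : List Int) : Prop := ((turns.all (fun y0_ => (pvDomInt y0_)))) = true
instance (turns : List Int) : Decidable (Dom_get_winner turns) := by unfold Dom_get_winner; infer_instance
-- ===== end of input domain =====

-- B replaces A's dict-counting + min() over unique keys by sorting a copy and scanning
-- runs for the first length-1 run (the smallest unique value); same results by a different algorithm.


-- ===== PORT A =====
def get_winner (turns : List Int) : Int :=
  let cnt : PySem.Dict Int Int := turns.foldl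
    (fun d turn => if d.contains turn = false then d.insert turn 1 else d.modify turn 0 (· + 1))
    PySem.Dict.empty
  let unique := cnt.keys.filter (fun turn => cnt.getD turn 0 == 1)
  if unique.length = 0 then -1
  else
    match PySem.List.min? unique (fun t => t) with
    | some m =>
      (match PySem.List.index? turns m with
       | some i => (i : Int)
       | none => -1)  -- unreachable: min(unique) is a dict key, hence occurs in turns
    | none => -1      -- unreachable: unique is nonempty here

-- ===== PORT B =====
-- the run scan over the sorted copy (Source B's outer while loop; the inner while is the dropWhile)
def firstSingleton : List Int → Option Int
  | [] => none
  | [x] => some x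
  | x :: y :: rest =>
    if y = x then firstSingleton ((y :: rest).dropWhile (· == x))
    else some x
termination_by l => l.length
decreasing_by
  have h := List.length_dropWhile_le (· == x) (y :: rest)
  simp at h ⊢; omega

def get_winner_alt (turns : List Int) : Int :=
  match firstSingleton (PySem.List.sorted turns (fun t => t) false) with
  | some v =>
    (match PySem.List.index? turns v with
     | some i => (i : Int)
     | none => -1)  -- unreachable: v occurs in turns
  | none => -1

-- ===== PRECONDITION & SPEC =====
def Spec_get_winner (turns : List Int) (out : Int) : Prop := out = get_winner_alt turns
instance (turns : List Int) (out : Int) : Decidable (Spec_get_winner turns out) := by unfold Spec_get_winner; infer_instance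

-- ===== CLAIM (what is proved, stated in full; the proofs are below) =====
def Claim_equal_get_winner : Prop := ∀ (turns : List Int), Dom_get_winner turns → Spec_get_winner turns (get_winner turns)

-- ===== LEMMAS AND PROOFS =====

-- A's branching counting loop is Counter(turns)
theorem pv_step_eq (d : PySem.Dict Int Int) (x : Int) :
    (if d.contains x = false then d.insert x 1 else d.modify x 0 (· + 1)) = d.modify x 0 (· + 1) := by
  by_cases h : d.contains x = false
  · have h2 : d.get? x = none := by rw [PySem.Dict.get?_eq_none_iff_contains]; simp [h]
    simp [h, PySem.Dict.insert, PySem.Dict.modify, PySem.Dict.getD, h2]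
  · simp [h]

theorem pv_cnt_eq (l : List Int) (d : PySem.Dict Int Int) :
    l.foldl (fun d turn => if d.contains turn = false then d.insert turn 1 else d.modify turn 0 (· + 1)) d
      = l.foldl (fun d x => d.modify x 0 (· + 1)) d := by
  induction l generalizing d with
  | nil => rfl
  | cons x t ih => simp only [List.foldl_cons, pv_step_eq]

-- firstSingleton on a sorted list returns a value of count 1, minimal among all count-1 values
theorem pv_fs_spec (s : List Int) :
    s.Pairwise (· ≤ ·) →
      (∀ v, firstSingleton s = some v → s.count v = 1 ∧ ∀ y, s.count y = 1 → v ≤ y) ∧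
      (firstSingleton s = none → ∀ y, s.count y ≠ 1) := by
  induction s using firstSingleton.induct with
  | case1 =>
    intro _
    refine ⟨by simp [firstSingleton], fun _ y => by simp⟩
  | case2 x =>
    intro _
    refine ⟨?_, by simp [firstSingleton]⟩
    intro v hv
    simp [firstSingleton] at hv; subst hv
    constructor
    · simp
    · intro y hy
      simp [List.count_singleton] at hy
      omega
  | case3 x rest ih =>
    intro hs
    set s' := (x :: rest).dropWhile (· == x) with hs'def
    have htail : (x :: rest).Pairwise (· ≤ ·) := hs.of_cons
    have hps' : s'.Pairwise (· ≤ ·) := htail.sublist (List.dropWhile_sublist _)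
    have hxle : ∀ z ∈ x :: rest, x ≤ z := fun z hz => List.rel_of_pairwise_cons hs hz
    -- x does not occur in s'
    have hxnot : x ∉ s' := by
      intro hmem
      have hne : s' ≠ [] := by intro h; rw [h] at hmem; exact absurd hmem (List.not_mem_nil)
      obtain ⟨a, t, hst⟩ := List.exists_cons_of_ne_nil hne
      have hadrop : (x :: rest).dropWhile (· == x) = a :: t := by rw [← hs'def]; exact hst
      have hax : (a == x) = false := by
        have h2 := List.head_dropWhile_not (· == x) (l := x :: rest) (by rw [hadrop]; simp)
        simp only [hadrop, List.head_cons] at h2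
        exact h2
      have haxne : a ≠ x := by simpa using hax
      have hamem : a ∈ x :: rest := (List.dropWhile_sublist _).mem (by rw [hadrop]; simp)
      have hxa : x < a := lt_of_le_of_ne (hxle a hamem) (Ne.symm haxne)
      rw [hst] at hmem hps'
      rcases List.mem_cons.mp hmem with h | h
      · omega
      · have := List.rel_of_pairwise_cons hps' h
        omega
    -- count decomposition: s = x :: (run ++ s') with run all x
    have hsplit : (x :: rest) = (x :: rest).takeWhile (· == x) ++ s' := (List.takeWhile_append_dropWhile).symm
    have hcount_ne : ∀ z, z ≠ x → (x :: x :: rest).count z = s'.count z := by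
      intro z hz
      have hrun : z ∉ rest.takeWhile (· == x) := by
        intro hm
        have := List.mem_takeWhile_imp hm
        simp at this; exact hz this
      conv_lhs => rw [show (x :: x :: rest) = x :: ((x :: rest).takeWhile (· == x) ++ s') from by rw [List.takeWhile_append_dropWhile]]
      simp [List.count_append, List.count_eq_zero.mpr hrun, Ne.symm hz]
    have hcx : (x :: x :: rest).count x ≥ 2 := by simp
    have hfix : firstSingleton (x :: x :: rest) = firstSingleton s' := by
      rw [firstSingleton]; simp [hs'def]
    have ih' := ih hps'
    constructor
    · intro v hv
      rw [hfix] at hv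
      obtain ⟨hv1, hvmin⟩ := ih'.1 v hv
      have hvmem : v ∈ s' := List.count_pos_iff.mp (by omega)
      have hvne : v ≠ x := fun h => hxnot (h ▸ hvmem)
      refine ⟨by rw [hcount_ne v hvne]; exact hv1, ?_⟩
      intro y0 hy0
      have hy0ne : y0 ≠ x := by intro h; rw [h] at hy0; omega
      exact hvmin y0 (by rw [← hcount_ne y0 hy0ne]; exact hy0)
    · intro hn y0 hy0
      rw [hfix] at hn
      have hy0ne : y0 ≠ x := by intro h; rw [h] at hy0; omega
      exact ih'.2 hn y0 (by rw [← hcount_ne y0 hy0ne]; exact hy0)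
  | case4 x y rest hxy =>
    intro hs
    have hfs : firstSingleton (x :: y :: rest) = some x := by
      rw [firstSingleton]; simp [hxy]
    have hxle : ∀ z ∈ y :: rest, x ≤ z := fun z hz => List.rel_of_pairwise_cons hs hz
    have hxlt : ∀ z ∈ y :: rest, x < z := by
      intro z hz
      rcases List.mem_cons.mp hz with rfl | hz
      · exact lt_of_le_of_ne (hxle z (by simp)) (fun h => hxy h.symm)
      · have hyz : y ≤ z := List.rel_of_pairwise_cons hs.of_cons hz
        have hxy' : x < y := lt_of_le_of_ne (hxle y (by simp)) (fun h => hxy h.symm)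
        omega
    have hxnot : x ∉ y :: rest := fun h => absurd (hxlt x h) (lt_irrefl x)
    constructor
    · intro v hv
      rw [hfs] at hv
      injection hv with hv; subst hv
      constructor
      · rw [List.count_cons_self, List.count_eq_zero.mpr hxnot]
      · intro y0 hy0
        have hy0mem : y0 ∈ x :: y :: rest := List.count_pos_iff.mp (by omega)
        rcases List.mem_cons.mp hy0mem with rfl | h
        · exact le_refl _
        · exact le_of_lt (hxlt y0 h)
    · intro hn; rw [hfs] at hn; exact absurd hn (by simp)

-- membership in A's `unique` list is exactly "occurs exactly once in turns"
theorem pv_mem_unique (turns : List Int) (z : Int) :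
    (z ∈ (PySem.Dict.counter turns).keys.filter
        (fun turn => (PySem.Dict.counter turns).getD turn 0 == 1)) ↔ turns.count z = 1 := by
  rw [List.mem_filter, PySem.Dict.keys_counter, PySem.Dict.getD_counter]
  constructor
  · rintro ⟨_, h2⟩
    have : (turns.count z : Int) = 1 := by exact_mod_cast beq_iff_eq.mp h2
    exact_mod_cast this
  · intro h
    refine ⟨(PySem.Set.mem_ofList _ _).mpr (List.count_pos_iff.mp (by omega)), ?_⟩
    simp [h]

-- ===== VERDICT (by name: the statement is the Claim_ definition above) =====
theorem get_winner_spec : Claim_equal_get_winner := by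
  intro turns _
  unfold Spec_get_winner get_winner get_winner_alt
  rw [pv_cnt_eq, ← PySem.Dict.counter_eq_foldl]
  simp only []
  set s := PySem.List.sorted turns (fun t => t) false with hsdef
  have hperm : s.Perm turns := PySem.List.sorted_perm turns (fun t => t) false
  have hcnt : ∀ z, s.count z = turns.count z := fun z => hperm.count_eq z
  have hfs := pv_fs_spec s (PySem.List.sorted_pairwise turns (fun t => t))
  set unique := (PySem.Dict.counter turns).keys.filter
      (fun turn => (PySem.Dict.counter turns).getD turn 0 == 1) with huq
  cases hcase : firstSingleton s with
  | none =>
    have hnone : ∀ y, turns.count y ≠ 1 := fun y h => hfs.2 hcase y (by rw [hcnt]; exact h)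
    have hueq : unique = [] := by
      rw [huq, List.filter_eq_nil_iff]
      intro a ha hb
      exact hnone a ((pv_mem_unique turns a).mp (List.mem_filter.mpr ⟨ha, hb⟩))
    rw [hueq]
    norm_num
  | some v =>
    obtain ⟨hv1, hvmin⟩ := hfs.1 v hcase
    have hvt : turns.count v = 1 := by rw [← hcnt]; exact hv1
    have hvu : v ∈ unique := (pv_mem_unique turns v).mpr hvt
    have hne : unique ≠ [] := fun h => by rw [h] at hvu; exact absurd hvu (List.not_mem_nil)
    have hlen : ¬ unique.length = 0 := by simp [List.length_eq_zero_iff, hne]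
    rw [if_neg hlen]
    cases hmin : PySem.List.min? unique (fun t => t) with
    | none => exact absurd ((PySem.List.min?_eq_none_iff unique _).mp hmin) hne
    | some m =>
      have hm1 : turns.count m = 1 := (pv_mem_unique turns m).mp (PySem.List.min?_mem hmin)
      have h1 : m ≤ v := PySem.List.min?_isMin hmin v hvu
      have h2 : v ≤ m := hvmin m (by rw [hcnt]; exact hm1)
      have : m = v := le_antisymm h1 h2
      subst this
      rfl
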